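-- pv_equiv track=rewrite | github.com/mohannad-121/AiFitCoach | scripts/prepare_datasets.py | _infer_allergens
-- ===== SOURCE A (Python) =====
-- def _infer_allergens(name: str, category: str) -> list[str]:
--     text = f"{name} {category}".lower()
--     allergens = set()
--     if any(token in text for token in ("milk", "cheese", "yogurt", "dairy", "butter")):
--         allergens.add("dairy")
--     if any(token in text for token in ("wheat", "bread", "pasta", "gluten", "barley", "rye")):
--         allergens.add("gluten")
--     if "egg" in text:
--         allergens.add("eggs")
--     if any(token in text for token in ("peanut", "almond", "cashew", "walnut", "nut")):
--         allergens.add("nuts")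
--     if any(token in text for token in ("shrimp", "fish", "salmon", "tuna", "seafood")):
--         allergens.add("seafood")
--     if "soy" in text:
--         allergens.add("soy")
--     return sorted(allergens)
-- ===== SOURCE B (Python) =====
-- # One left-to-right sweep over the text: at each position, test which trigger
-- # tokens start there (naive multi-pattern scan) and record their tags.
-- _TOKEN_TAG = (
--     ("milk", "dairy"), ("cheese", "dairy"), ("yogurt", "dairy"), ("dairy", "dairy"), ("butter", "dairy"),
--     ("wheat", "gluten"), ("bread", "gluten"), ("pasta", "gluten"), ("gluten", "gluten"), ("barley", "gluten"), ("rye", "gluten"),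
--     ("egg", "eggs"),
--     ("peanut", "nuts"), ("almond", "nuts"), ("cashew", "nuts"), ("walnut", "nuts"), ("nut", "nuts"),
--     ("shrimp", "seafood"), ("fish", "seafood"), ("salmon", "seafood"), ("tuna", "seafood"), ("seafood", "seafood"),
--     ("soy", "soy"),
-- )
--
-- def _infer_allergens(name: str, category: str) -> list[str]:
--     text = f"{name} {category}".lower()
--     found = set()
--     for i in range(len(text)):
--         for token, tag in _TOKEN_TAG:
--             if text.startswith(token, i):
--                 found.add(tag)
--     return sorted(found)
-- ===== Notes on version B (the rewrite author's own statement) =====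
-- stated objective: alternative
-- what changed: Instead of six per-group any-substring membership tests, B makes a single left-to-right sweep over the lowered text and at each position tests a flat (token, tag) pattern table with startswith, collecting tags (naive multi-pattern scan).
import Mathlib
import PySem

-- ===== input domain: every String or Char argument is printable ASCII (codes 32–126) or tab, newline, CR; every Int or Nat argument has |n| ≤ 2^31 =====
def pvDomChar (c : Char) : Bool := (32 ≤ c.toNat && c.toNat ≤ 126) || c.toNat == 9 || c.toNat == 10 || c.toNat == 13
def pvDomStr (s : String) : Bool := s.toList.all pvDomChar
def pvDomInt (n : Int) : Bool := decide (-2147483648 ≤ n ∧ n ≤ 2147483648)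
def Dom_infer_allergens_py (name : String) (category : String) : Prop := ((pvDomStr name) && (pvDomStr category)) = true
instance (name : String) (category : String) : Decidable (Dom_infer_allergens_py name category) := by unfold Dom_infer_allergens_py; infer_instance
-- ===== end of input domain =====

-- B replaces A's six per-group any-substring membership tests by a single left-to-right
-- sweep over the lowered text, testing a flat (token, tag) pattern table at each position
-- (objective: alternative — a naive multi-pattern scan; same asymptotic cost, not claimed faster).

-- ===== PORT A =====
def infer_allergens_py (name : String) (category : String) : List String :=
  let text := PySem.Str.lower (PySem.Str.join " " [name, category])
  let allergens : PySem.Set String := PySem.Set.empty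
  let allergens := if ["milk", "cheese", "yogurt", "dairy", "butter"].any
      (fun token => PySem.Str.isIn token text) then allergens.add "dairy" else allergens
  let allergens := if ["wheat", "bread", "pasta", "gluten", "barley", "rye"].any
      (fun token => PySem.Str.isIn token text) then allergens.add "gluten" else allergens
  let allergens := if PySem.Str.isIn "egg" text then allergens.add "eggs" else allergens
  let allergens := if ["peanut", "almond", "cashew", "walnut", "nut"].any
      (fun token => PySem.Str.isIn token text) then allergens.add "nuts" else allergens
  let allergens := if ["shrimp", "fish", "salmon", "tuna", "seafood"].any
      (fun token => PySem.Str.isIn token text) then allergens.add "seafood" else allergens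
  let allergens := if PySem.Str.isIn "soy" text then allergens.add "soy" else allergens
  PySem.List.sorted allergens (fun x => x) false

-- ===== PORT B =====
def tokenTagTable : List (String × String) :=
  [("milk", "dairy"), ("cheese", "dairy"), ("yogurt", "dairy"), ("dairy", "dairy"), ("butter", "dairy"),
   ("wheat", "gluten"), ("bread", "gluten"), ("pasta", "gluten"), ("gluten", "gluten"), ("barley", "gluten"), ("rye", "gluten"),
   ("egg", "eggs"),
   ("peanut", "nuts"), ("almond", "nuts"), ("cashew", "nuts"), ("walnut", "nuts"), ("nut", "nuts"),
   ("shrimp", "seafood"), ("fish", "seafood"), ("salmon", "seafood"), ("tuna", "seafood"), ("seafood", "seafood"),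
   ("soy", "soy")]

def infer_allergens_py_alt (name : String) (category : String) : List String :=
  let text := PySem.Str.lower (PySem.Str.join " " [name, category])
  let found : PySem.Set String :=
    (PySem.List.pyRange 0 (PySem.Str.len text) 1).foldl
      (fun s i =>
        tokenTagTable.foldl
          -- text.startswith(token, i): exact as startswith on the suffix slice for 0 ≤ i < len(text)
          (fun s p => if PySem.Str.startswith (PySem.Str.slice text (some i) none) p.1 then s.add p.2 else s) s)
      PySem.Set.empty
  PySem.List.sorted found (fun x => x) false

-- ===== PRECONDITION & SPEC =====
def Spec_infer_allergens_py (name : String) (category : String) (out : List String) : Prop := out = infer_allergens_py_alt name category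
instance (name : String) (category : String) (out : List String) : Decidable (Spec_infer_allergens_py name category out) := by unfold Spec_infer_allergens_py; infer_instance

-- ===== CLAIM (what is proved, stated in full; the proofs are below) =====
def Claim_equal_infer_allergens_py : Prop := ∀ (name : String) (category : String), Dom_infer_allergens_py name category → Spec_infer_allergens_py name category (infer_allergens_py name category)

-- ===== LEMMAS AND PROOFS =====

-- membership through a fold whose step adds exactly the elements satisfying C
theorem mem_foldl_step {α β : Type} (l : List α) (step : List β → α → List β)
    (C : α → β → Prop) (h : ∀ s a y, y ∈ step s a ↔ y ∈ s ∨ C a y) :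
    ∀ (s : List β) (y : β), y ∈ l.foldl step s ↔ y ∈ s ∨ ∃ a ∈ l, C a y := by
  induction l with
  | nil => simp
  | cons a l ih =>
    intro s y
    rw [List.foldl_cons, ih, h]
    simp only [List.mem_cons]
    constructor
    · rintro (⟨hy | hc⟩ | ⟨b, hb, hc⟩)
      · exact Or.inl hy
      · exact Or.inr ⟨a, Or.inl rfl, hc⟩
      · exact Or.inr ⟨b, Or.inr hb, hc⟩
    · rintro (hy | ⟨b, (rfl | hb), hc⟩)
      · exact Or.inl (Or.inl hy)
      · exact Or.inl (Or.inr hc)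
      · exact Or.inr ⟨b, hb, hc⟩

theorem nodup_foldl_step {α β : Type} (l : List α) (step : List β → α → List β)
    (h : ∀ s a, s.Nodup → (step s a).Nodup) :
    ∀ (s : List β), s.Nodup → (l.foldl step s).Nodup := by
  induction l with
  | nil => intro s hs; simpa using hs
  | cons a l ih => intro s hs; rw [List.foldl_cons]; exact ih _ (h s a hs)

theorem mem_condAdd {c : Prop} [Decidable c] (s : PySem.Set String) (x y : String) :
    (y ∈ if c then s.add x else s) ↔ (y ∈ s ∨ (c ∧ y = x)) := by
  by_cases h : c <;> simp [h, PySem.Set.mem_add]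

theorem nodup_condAdd {c : Prop} [Decidable c] (s : PySem.Set String) (x : String) (hs : s.Nodup) :
    (if c then s.add x else s).Nodup := by
  by_cases h : c
  · simpa [h] using PySem.Set.nodup_add s x hs
  · simpa [h] using hs

-- one position of the sweep matches token at i  ⟺  token is a substring (nonempty token)
theorem scan_iff (text tok : String) (hne : tok.toList ≠ []) :
    (∃ i ∈ PySem.List.pyRange 0 (PySem.Str.len text) 1,
        PySem.Str.startswith (PySem.Str.slice text (some i) none) tok = true)
      ↔ PySem.Str.isIn tok text = true := by
  have hbridge : ∀ i : Int, 0 ≤ i →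
      (PySem.Str.startswith (PySem.Str.slice text (some i) none) tok = true ↔
        tok.toList <+: text.toList.drop i.toNat) := by
    intro i hi
    rw [← PySem.Chars.startswith_iff]
    simp [PySem.List.slice_from _ hi]
  constructor
  · rintro ⟨i, hi, hs⟩
    rw [PySem.List.mem_pyRange_one] at hi
    rw [show PySem.Str.isIn tok text = PySem.Chars.isIn tok.toList text.toList from by simp,
      ← PySem.Chars.exists_prefix_drop_iff_isIn]
    exact ⟨i.toNat, (hbridge i hi.1).mp hs⟩
  · intro hin
    rw [show PySem.Str.isIn tok text = PySem.Chars.isIn tok.toList text.toList from by simp,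
      ← PySem.Chars.exists_prefix_drop_iff_isIn] at hin
    obtain ⟨j, hj⟩ := hin
    have hjlt : j < text.toList.length := by
      by_contra hge
      simp only [not_lt] at hge
      rw [List.drop_eq_nil_of_le hge] at hj
      exact hne (List.prefix_nil.mp hj)
    refine ⟨(j : Int), ?_, ?_⟩
    · rw [PySem.List.mem_pyRange_one]
      constructor
      · exact Int.natCast_nonneg j
      · simpa using hjlt
    · exact (hbridge (j : Int) (Int.natCast_nonneg j)).mpr (by simpa using hj)

-- ===== VERDICT (by name: the statement is the Claim_ definition above) =====
set_option maxHeartbeats 1600000 in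
theorem infer_allergens_py_spec : Claim_equal_infer_allergens_py := by
  intro name category _
  unfold Spec_infer_allergens_py infer_allergens_py infer_allergens_py_alt
  dsimp only
  set text := PySem.Str.lower (PySem.Str.join " " [name, category]) with htext
  -- the inner fold over the table at one position
  have hinner : ∀ (s : PySem.Set String) (i : Int) (y : String),
      y ∈ tokenTagTable.foldl
        (fun s p => if PySem.Str.startswith (PySem.Str.slice text (some i) none) p.1 then s.add p.2 else s) s
      ↔ y ∈ s ∨ ∃ p ∈ tokenTagTable,
          PySem.Str.startswith (PySem.Str.slice text (some i) none) p.1 = true ∧ y = p.2 := by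
    intro s i y
    exact mem_foldl_step tokenTagTable
      (fun s p => if PySem.Str.startswith (PySem.Str.slice text (some i) none) p.1 then PySem.Set.add s p.2 else s)
      (fun p y => PySem.Str.startswith (PySem.Str.slice text (some i) none) p.1 = true ∧ y = p.2)
      (fun s p y => mem_condAdd s p.2 y) s y
  -- membership in B's set
  have hmemB : ∀ y : String,
      y ∈ (PySem.List.pyRange 0 (PySem.Str.len text) 1).foldl
        (fun s i => tokenTagTable.foldl
          (fun s p => if PySem.Str.startswith (PySem.Str.slice text (some i) none) p.1 then s.add p.2 else s) s)
        PySem.Set.empty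
      ↔ ∃ p ∈ tokenTagTable, PySem.Str.isIn p.1 text = true ∧ y = p.2 := by
    intro y
    have htok : ∀ p ∈ tokenTagTable, p.1.toList ≠ [] := by decide
    rw [mem_foldl_step _ _
      (fun i y => ∃ p ∈ tokenTagTable,
        PySem.Str.startswith (PySem.Str.slice text (some i) none) p.1 = true ∧ y = p.2)
      (fun s i y => hinner s i y)]
    simp only [PySem.Set.empty, List.not_mem_nil, false_or]
    constructor
    · rintro ⟨i, hi, p, hp, hs, rfl⟩
      exact ⟨p, hp, (scan_iff text p.1 (htok p hp)).mp ⟨i, hi, hs⟩, rfl⟩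
    · rintro ⟨p, hp, hin, rfl⟩
      obtain ⟨i, hi, hs⟩ := (scan_iff text p.1 (htok p hp)).mpr hin
      exact ⟨i, hi, p, hp, hs, rfl⟩
  -- Nodup of B's set
  have hndB :
      ((PySem.List.pyRange 0 (PySem.Str.len text) 1).foldl
        (fun s i => tokenTagTable.foldl
          (fun s p => if PySem.Str.startswith (PySem.Str.slice text (some i) none) p.1 then s.add p.2 else s) s)
        PySem.Set.empty).Nodup := by
    refine nodup_foldl_step _ _ ?_ _ List.nodup_nil
    intro s i hs
    exact nodup_foldl_step _ _ (fun s p hs => nodup_condAdd s p.2 hs) s hs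
  refine PySem.List.sorted_eq_sorted_of_perm _ _ _ (fun a b h => h)
    ((List.perm_ext_iff_of_nodup ?_ hndB).mpr ?_)
  · split_ifs <;> decide
  intro y
  rw [hmemB y]
  simp only [mem_condAdd, PySem.Set.empty, List.not_mem_nil, List.any_cons,
    List.any_nil, Bool.or_false, Bool.or_eq_true, tokenTagTable, List.mem_cons,
    List.not_mem_nil, or_false, false_or]
  constructor
  · rintro h
    rcases h with ((((h | h) | h) | h) | h) | h
    · rcases h with ⟨(h|h|h|h|h), rfl⟩
      exacts [⟨("milk","dairy"), by simp, h, rfl⟩, ⟨("cheese","dairy"), by simp, h, rfl⟩, ⟨("yogurt","dairy"), by simp, h, rfl⟩, ⟨("dairy","dairy"), by simp, h, rfl⟩, ⟨("butter","dairy"), by simp, h, rfl⟩]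
    · rcases h with ⟨(h|h|h|h|h|h), rfl⟩
      exacts [⟨("wheat","gluten"), by simp, h, rfl⟩, ⟨("bread","gluten"), by simp, h, rfl⟩, ⟨("pasta","gluten"), by simp, h, rfl⟩, ⟨("gluten","gluten"), by simp, h, rfl⟩, ⟨("barley","gluten"), by simp, h, rfl⟩, ⟨("rye","gluten"), by simp, h, rfl⟩]
    · rcases h with ⟨h, rfl⟩
      exact ⟨("egg","eggs"), by simp, h, rfl⟩
    · rcases h with ⟨(h|h|h|h|h), rfl⟩
      exacts [⟨("peanut","nuts"), by simp, h, rfl⟩, ⟨("almond","nuts"), by simp, h, rfl⟩, ⟨("cashew","nuts"), by simp, h, rfl⟩, ⟨("walnut","nuts"), by simp, h, rfl⟩, ⟨("nut","nuts"), by simp, h, rfl⟩]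
    · rcases h with ⟨(h|h|h|h|h), rfl⟩
      exacts [⟨("shrimp","seafood"), by simp, h, rfl⟩, ⟨("fish","seafood"), by simp, h, rfl⟩, ⟨("salmon","seafood"), by simp, h, rfl⟩, ⟨("tuna","seafood"), by simp, h, rfl⟩, ⟨("seafood","seafood"), by simp, h, rfl⟩]
    · rcases h with ⟨h, rfl⟩
      exact ⟨("soy","soy"), by simp, h, rfl⟩
  · rintro ⟨p, hp, hin, rfl⟩
    rcases hp with rfl|rfl|rfl|rfl|rfl|rfl|rfl|rfl|rfl|rfl|rfl|rfl|rfl|rfl|rfl|rfl|rfl|rfl|rfl|rfl|rfl|rfl|rfl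
    · exact Or.inl (Or.inl (Or.inl (Or.inl (Or.inl (⟨Or.inl hin, rfl⟩)))))
    · exact Or.inl (Or.inl (Or.inl (Or.inl (Or.inl (⟨Or.inr (Or.inl hin), rfl⟩)))))
    · exact Or.inl (Or.inl (Or.inl (Or.inl (Or.inl (⟨Or.inr (Or.inr (Or.inl hin)), rfl⟩)))))
    · exact Or.inl (Or.inl (Or.inl (Or.inl (Or.inl (⟨Or.inr (Or.inr (Or.inr (Or.inl hin))), rfl⟩)))))
    · exact Or.inl (Or.inl (Or.inl (Or.inl (Or.inl (⟨Or.inr (Or.inr (Or.inr (Or.inr (hin)))), rfl⟩)))))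
    · exact Or.inl (Or.inl (Or.inl (Or.inl (Or.inr (⟨Or.inl hin, rfl⟩)))))
    · exact Or.inl (Or.inl (Or.inl (Or.inl (Or.inr (⟨Or.inr (Or.inl hin), rfl⟩)))))
    · exact Or.inl (Or.inl (Or.inl (Or.inl (Or.inr (⟨Or.inr (Or.inr (Or.inl hin)), rfl⟩)))))
    · exact Or.inl (Or.inl (Or.inl (Or.inl (Or.inr (⟨Or.inr (Or.inr (Or.inr (Or.inl hin))), rfl⟩)))))
    · exact Or.inl (Or.inl (Or.inl (Or.inl (Or.inr (⟨Or.inr (Or.inr (Or.inr (Or.inr (Or.inl hin)))), rfl⟩)))))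
    · exact Or.inl (Or.inl (Or.inl (Or.inl (Or.inr (⟨Or.inr (Or.inr (Or.inr (Or.inr (Or.inr (hin))))), rfl⟩)))))
    · exact Or.inl (Or.inl (Or.inl (Or.inr (⟨hin, rfl⟩))))
    · exact Or.inl (Or.inl (Or.inr (⟨Or.inl hin, rfl⟩)))
    · exact Or.inl (Or.inl (Or.inr (⟨Or.inr (Or.inl hin), rfl⟩)))
    · exact Or.inl (Or.inl (Or.inr (⟨Or.inr (Or.inr (Or.inl hin)), rfl⟩)))
    · exact Or.inl (Or.inl (Or.inr (⟨Or.inr (Or.inr (Or.inr (Or.inl hin))), rfl⟩)))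
    · exact Or.inl (Or.inl (Or.inr (⟨Or.inr (Or.inr (Or.inr (Or.inr (hin)))), rfl⟩)))
    · exact Or.inl (Or.inr (⟨Or.inl hin, rfl⟩))
    · exact Or.inl (Or.inr (⟨Or.inr (Or.inl hin), rfl⟩))
    · exact Or.inl (Or.inr (⟨Or.inr (Or.inr (Or.inl hin)), rfl⟩))
    · exact Or.inl (Or.inr (⟨Or.inr (Or.inr (Or.inr (Or.inl hin))), rfl⟩))
    · exact Or.inl (Or.inr (⟨Or.inr (Or.inr (Or.inr (Or.inr (hin)))), rfl⟩))
    · exact Or.inr (⟨hin, rfl⟩)
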